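-- pv_equiv track=rewrite | github.com/shun-dong/projecter | projecter.py | parse_yaml_front
-- ===== SOURCE A (Python) =====
-- def parse_yaml_front(lines):
--     if not lines or not lines[0].strip() == '---':
--         return [], -1
--     yaml_lines = []
--     for i, line in enumerate(lines[1:], 1):
--         if line.strip() == '---':
--             return yaml_lines, i
--         yaml_lines.append(line.rstrip('\n'))
--     return [], -1
-- ===== SOURCE B (Python) =====
-- def parse_yaml_front(lines):
--     if not lines or lines[0].strip() != '---':
--         return [], -1
--     body = lines[1:]
--     idx = next((i for i, l in enumerate(body) if l.strip() == '---'), None)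
--     if idx is None:
--         return [], -1
--     return [l.rstrip('\n') for l in body[:idx]], idx + 1
-- ===== Notes on version B (the rewrite author's own statement) =====
-- stated objective: alternative
-- what changed: B splits A's single interleaved append-while-scanning loop into two phases: first locate the closing '---' delimiter's index with a generator/next search, then build the result as one comprehension over the slice before it.
import Mathlib
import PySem

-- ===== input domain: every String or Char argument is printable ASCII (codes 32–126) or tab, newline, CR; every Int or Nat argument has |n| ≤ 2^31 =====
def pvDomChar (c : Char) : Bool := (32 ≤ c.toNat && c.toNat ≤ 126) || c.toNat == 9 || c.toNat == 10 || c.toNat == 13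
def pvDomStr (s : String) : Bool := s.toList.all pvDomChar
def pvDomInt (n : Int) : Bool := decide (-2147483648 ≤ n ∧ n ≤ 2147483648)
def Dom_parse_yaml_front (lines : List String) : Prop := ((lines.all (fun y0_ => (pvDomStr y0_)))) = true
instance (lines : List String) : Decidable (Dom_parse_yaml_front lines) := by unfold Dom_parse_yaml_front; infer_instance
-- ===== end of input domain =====

-- B locates the closing '---' index first, then maps rstrip('\n') over the slice,
-- instead of A's single loop that appends while scanning (alternative decomposition, same cost).


-- ===== PORT A =====
-- s.rstrip('\n'): drop trailing newline characters (exact: hand port, PySem has no one-sided stripChars)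
def rstripNl (s : String) : String :=
  String.ofList ((s.toList.reverse.dropWhile (fun c => c == '\n')).reverse)

-- the 'for i, line in enumerate(lines[1:], 1)' loop with accumulator yaml_lines
def parseLoopA : List String → Int → List String → List String × Int
  | [], _, _ => ([], -1)
  | l :: rest, i, acc =>
    if PySem.Str.strip l == "---" then (acc, i)
    else parseLoopA rest (i + 1) (acc ++ [rstripNl l])

def parse_yaml_front (lines : List String) : List String × Int :=
  match lines with
  | [] => ([], -1)
  | l0 :: rest =>
    if ¬ (PySem.Str.strip l0 == "---") = true then ([], -1)
    else parseLoopA rest 1 []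

-- ===== PORT B =====
def parse_yaml_front_alt (lines : List String) : List String × Int :=
  match lines with
  | [] => ([], -1)
  | l0 :: body =>
    if (PySem.Str.strip l0 == "---") = false then ([], -1)
    else
      match body.findIdx? (fun l => PySem.Str.strip l == "---") with
      | none => ([], -1)
      | some j => ((body.take j).map rstripNl, (j : Int) + 1)

-- ===== PRECONDITION & SPEC =====
def Spec_parse_yaml_front (lines : List String) (out : List String × Int) : Prop := out = parse_yaml_front_alt lines
instance (lines : List String) (out : List String × Int) : Decidable (Spec_parse_yaml_front lines out) := by unfold Spec_parse_yaml_front; infer_instance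

-- ===== CLAIM (what is proved, stated in full; the proofs are below) =====
def Claim_equal_parse_yaml_front : Prop := ∀ (lines : List String), Dom_parse_yaml_front lines → Spec_parse_yaml_front lines (parse_yaml_front lines)

-- ===== LEMMAS AND PROOFS =====
-- A's loop computes B's locate-then-slice value, for any start index and accumulator.
theorem parseLoopA_eq (rest : List String) : ∀ (i : Int) (acc : List String),
    parseLoopA rest i acc =
      match rest.findIdx? (fun l => PySem.Str.strip l == "---") with
      | none => ([], -1)
      | some j => (acc ++ (rest.take j).map rstripNl, i + (j : Int)) := by
  induction rest with
  | nil => intro i acc; simp [parseLoopA]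
  | cons l rest ih =>
    intro i acc
    by_cases h : (PySem.Str.strip l == "---") = true
    · simp [parseLoopA, h, List.findIdx?_cons]
    · rw [show parseLoopA (l :: rest) i acc = parseLoopA rest (i + 1) (acc ++ [rstripNl l]) from by
        simp [parseLoopA, h], ih, List.findIdx?_cons]
      simp only [h]
      cases hf : List.findIdx? (fun l => PySem.Str.strip l == "---") rest with
      | none => simp
      | some j =>
        simp [List.take_succ_cons]
        omega

-- ===== VERDICT (by name: the statement is the Claim_ definition above) =====
theorem parse_yaml_front_spec : Claim_equal_parse_yaml_front := by
  intro lines _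
  unfold Spec_parse_yaml_front parse_yaml_front parse_yaml_front_alt
  match lines with
  | [] => rfl
  | l0 :: body =>
    by_cases h : (PySem.Str.strip l0 == "---") = true
    · simp only [h, Bool.true_eq_false, if_false, parseLoopA_eq]
      cases hf : List.findIdx? (fun l => PySem.Str.strip l == "---") body with
      | none => rfl
      | some j => simp; omega
    · simp [h]
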